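-- pv_equiv track=rewrite | github.com/pvkrotkov/7_Symmetric_ciphers | festel.py | fst
-- ===== SOURCE A (Python) =====
-- def fst(L,R,keyi, N, key):
--     d_key=len(key)
--     for i in range(N):
--         K = ord(key[keyi % d_key::][0])
--         temp = R ^ (L ^ K)
--         R = L
--         L = temp
--         keyi += 1
--     end = (chr(R) + chr(L))
--     return end,keyi
-- ===== SOURCE B (Python) =====
-- def fst(L, R, keyi, N, key):
--     if N <= 0:
--         return chr(R) + chr(L), keyi
--     d = len(key)
--     r = N % (6 * d)              # 6*d rounds are the identity on (L, R)
--     m = r % 3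
--     xL = 0
--     xR = 0
--     for j in range(r):
--         k = ord(key[(keyi + j) % d])
--         if j % 3 != m:
--             xL ^= k
--         if j % 3 != (m + 2) % 3:
--             xR ^= k
--     if m == 0:
--         outL, outR = L ^ xL, R ^ xR
--     elif m == 1:
--         outL, outR = L ^ R ^ xL, L ^ xR
--     else:
--         outL, outR = R ^ xL, L ^ R ^ xR
--     return chr(outR) + chr(outL), keyi + N
-- ===== Notes on version B (the rewrite author's own statement) =====
-- stated objective: faster
-- what changed: B never iterates the Feistel state: since each round is affine over XOR with a linear part of order 3 and a key schedule of period len(key), B reduces N to r = N % (6*len(key)), accumulates two key-XOR masks over the r key positions (membership decided by j%3), and produces the output by a 3-case closed affine formula in (L,R) plus keyi+N.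
import Mathlib
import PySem

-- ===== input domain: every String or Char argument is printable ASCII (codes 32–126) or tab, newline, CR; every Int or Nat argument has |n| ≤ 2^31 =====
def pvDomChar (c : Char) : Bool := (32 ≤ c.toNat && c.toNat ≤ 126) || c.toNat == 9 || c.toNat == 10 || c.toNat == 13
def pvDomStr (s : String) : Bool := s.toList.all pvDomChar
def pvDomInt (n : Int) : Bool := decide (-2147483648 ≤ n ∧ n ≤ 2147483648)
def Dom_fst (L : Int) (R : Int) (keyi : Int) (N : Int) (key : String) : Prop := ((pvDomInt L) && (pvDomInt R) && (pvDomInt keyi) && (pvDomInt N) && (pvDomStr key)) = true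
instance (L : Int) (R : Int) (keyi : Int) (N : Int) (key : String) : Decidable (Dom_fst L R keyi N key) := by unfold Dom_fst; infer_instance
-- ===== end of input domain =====

-- B replaces A's N-round Feistel state iteration by a closed form: r = N % (6*len(key)) (6*len(key)
-- rounds are the identity over XOR), two key-XOR masks accumulated over the r key positions, and a
-- 3-case affine formula in (L,R); keyi is returned as keyi+N directly: asymptotically faster.


-- ===== PORT A =====
-- Python ord(c): exact.
def pyOrd (c : Char) : Int := (c.toNat : Int)
-- Python chr(n): exact for valid non-surrogate codepoints (Pre_fst ensures the two final chr calls get one).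
def pyChr (n : Int) : Char := Char.ofNat n.toNat

-- loop body of A: K = ord(key[keyi % d_key::][0]); temp = R ^ (L ^ K); R = L; L = temp; keyi += 1
-- ([0] of the slice is totalized with headD; only reached for key = "", excluded by Pre_fst when 0 < N)
def fstStepA (ks : List Char) (d : Int) (st : Int × Int × Int) : Int × Int × Int :=
  let K := pyOrd ((PySem.List.slice ks (some (PySem.Int.mod st.2.2 d)) none).headD 'A')
  let temp := PySem.Int.bxor st.2.1 (PySem.Int.bxor st.1 K)
  (temp, st.1, st.2.2 + 1)

def fst (L : Int) (R : Int) (keyi : Int) (N : Int) (key : String) : String × Int :=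
  let d_key : Int := ((key.toList).length : Int)
  let st := (PySem.List.pyRange 0 N 1).foldl (fun st _i => fstStepA key.toList d_key st) (L, R, keyi)
  (String.ofList [pyChr st.2.1, pyChr st.1], st.2.2)

-- ===== PORT B =====
-- loop body of B: k = ord(key[(keyi+j) % d]); if j%3 != m: xL ^= k; if j%3 != (m+2)%3: xR ^= k
def fstStepB (ks : List Char) (d : Int) (keyi : Int) (m : Int) (st : Int × Int) (j : Int) : Int × Int :=
  let k := pyOrd (PySem.List.pyGetD ks (PySem.Int.mod (keyi + j) d) 'A')
  (if PySem.Int.mod j 3 ≠ m then PySem.Int.bxor st.1 k else st.1,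
   if PySem.Int.mod j 3 ≠ PySem.Int.mod (m + 2) 3 then PySem.Int.bxor st.2 k else st.2)

def fst_alt (L : Int) (R : Int) (keyi : Int) (N : Int) (key : String) : String × Int :=
  if N ≤ 0 then (String.ofList [pyChr R, pyChr L], keyi)
  else
    let d : Int := ((key.toList).length : Int)
    let r := PySem.Int.mod N (6 * d)
    let m := PySem.Int.mod r 3
    let x := (PySem.List.pyRange 0 r 1).foldl (fstStepB key.toList d keyi m) (0, 0)
    let outL := if m = 0 then PySem.Int.bxor L x.1
                else if m = 1 then PySem.Int.bxor (PySem.Int.bxor L R) x.1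
                else PySem.Int.bxor R x.1
    let outR := if m = 0 then PySem.Int.bxor R x.2
                else if m = 1 then PySem.Int.bxor L x.2
                else PySem.Int.bxor (PySem.Int.bxor L R) x.2
    (String.ofList [pyChr outR, pyChr outL], keyi + N)

-- ===== PRECONDITION & SPEC =====
-- codepoints on which chr is defined and the result is a Lean-representable (non-surrogate) Char
def pvChrSafe (v : Int) : Prop := 0 ≤ v ∧ (v < 55296 ∨ (57344 ≤ v ∧ v < 1114112))
-- Pre_fst excludes (a) key = "" with 0 < N, where A raises ZeroDivisionError, and (b) inputs whose two
-- final chr() arguments are invalid (A raises ValueError) or lone surrogates, where A's returned str is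
-- not representable as a Lean String; under Dom the key bytes are < 128, so they only perturb the low 7
-- bits of the two final values, whose remaining bits are the stated XOR combination of L and R
-- selected by N % 3 — so pvChrSafe of those combinations is exactly chr-validity of A's final values.
def Pre_fst (L : Int) (R : Int) (keyi : Int) (N : Int) (key : String) : Prop :=
  (0 < N → key ≠ "") ∧
  (let m := if N ≤ 0 then (0 : Int) else PySem.Int.mod N 3
   let hL := if m = 1 then PySem.Int.bxor L R else if m = 2 then R else L
   let hR := if m = 1 then L else if m = 2 then PySem.Int.bxor L R else R
   pvChrSafe hR ∧ pvChrSafe hL)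
instance (L : Int) (R : Int) (keyi : Int) (N : Int) (key : String) : Decidable (Pre_fst L R keyi N key) := by
  unfold Pre_fst pvChrSafe; infer_instance

def pvWitness_fst : Int × Int × Int × Int × String := (65, 66, 0, 5, "key")

def Spec_fst (L : Int) (R : Int) (keyi : Int) (N : Int) (key : String) (out : String × Int) : Prop := out = fst_alt L R keyi N key
instance (L : Int) (R : Int) (keyi : Int) (N : Int) (key : String) (out : String × Int) : Decidable (Spec_fst L R keyi N key out) := by unfold Spec_fst; infer_instance

-- ===== CLAIM (what is proved, stated in full; the proofs are below) =====
def Claim_equal_fst : Prop := ∀ (L : Int) (R : Int) (keyi : Int) (N : Int) (key : String), Dom_fst L R keyi N key → Pre_fst L R keyi N key → Spec_fst L R keyi N key (fst L R keyi N key)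

-- ===== LEMMAS AND PROOFS =====

-- --- XOR as a commutative involutive operation: sign/magnitude normal form for PySem.Int.bxor ---
def pvEnc (s : Bool) (m : Nat) : Int := if s then -(m : Int) - 1 else (m : Int)
def pvMag (a : Int) : Nat := if a < 0 then (-a - 1).toNat else a.toNat

theorem bxor_eq_enc (a b : Int) :
    PySem.Int.bxor a b = pvEnc (xor (decide (a < 0)) (decide (b < 0))) (pvMag a ^^^ pvMag b) := by
  rcases le_or_gt 0 a with ha | ha <;> rcases le_or_gt 0 b with hb | hb <;>
    simp [PySem.Int.bxor, pvEnc, pvMag, not_le.mpr, ha, hb, not_lt.mpr]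

theorem sgn_enc (s : Bool) (m : Nat) : decide (pvEnc s m < 0) = s := by
  cases s <;> simp [pvEnc] <;> omega

theorem mag_enc (s : Bool) (m : Nat) : pvMag (pvEnc s m) = m := by
  cases s <;> simp [pvEnc, pvMag] <;> omega

theorem bxor_assoc (a b c : Int) :
    PySem.Int.bxor (PySem.Int.bxor a b) c = PySem.Int.bxor a (PySem.Int.bxor b c) := by
  rw [bxor_eq_enc a b, bxor_eq_enc b c, bxor_eq_enc (pvEnc _ _), bxor_eq_enc a (pvEnc _ _),
    sgn_enc, mag_enc, sgn_enc, mag_enc, Bool.xor_assoc, Nat.xor_assoc]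

theorem bxor_left_comm (a b c : Int) :
    PySem.Int.bxor a (PySem.Int.bxor b c) = PySem.Int.bxor b (PySem.Int.bxor a c) := by
  rw [← bxor_assoc, PySem.Int.bxor_comm a b, bxor_assoc]

theorem bxor_zero_left (a : Int) : PySem.Int.bxor 0 a = a := by
  rw [PySem.Int.bxor_comm, PySem.Int.bxor_zero]

theorem bxor_cancel (a b : Int) : PySem.Int.bxor a (PySem.Int.bxor a b) = b := by
  rw [← bxor_assoc, PySem.Int.bxor_self, bxor_zero_left]

-- --- A's round recursion ---
def kAt (ks : List Char) (j : Int) : Int :=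
  ((ks.getD (PySem.Int.mod j (ks.length : Int)).toNat 'A').toNat : Int)

def run (ks : List Char) : Nat → Int → Int × Int → Int × Int
  | 0, _, s => s
  | n + 1, j, s => run ks n (j + 1) (PySem.Int.bxor s.2 (PySem.Int.bxor s.1 (kAt ks j)), s.1)

theorem run_append (ks : List Char) (m n : Nat) :
    ∀ (j : Int) (s : Int × Int), run ks (m + n) j s = run ks n (j + (m : Int)) (run ks m j s) := by
  induction m with
  | zero => intro j s; simp [run]
  | succ m ih =>
      intro j s
      have h1 : m + 1 + n = (m + n) + 1 := by omega
      rw [h1]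
      show run ks (m + n) (j + 1) _ = _
      rw [ih (j + 1)]
      have : j + 1 + (m : Int) = j + ((m : Int) + 1) := by ring
      rw [this]
      push_cast
      rfl

theorem kAt_add_d (ks : List Char) (hks : ks ≠ []) (j : Int) :
    kAt ks (j + (ks.length : Int)) = kAt ks j := by
  have hd : (0 : Int) < (ks.length : Int) := by
    have := List.length_pos_iff.mpr hks; exact_mod_cast this
  unfold kAt
  have : PySem.Int.mod (j + (ks.length : Int)) (ks.length : Int) = PySem.Int.mod j (ks.length : Int) := by
    rw [PySem.Int.mod_eq_emod_of_pos hd, PySem.Int.mod_eq_emod_of_pos hd,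
      show j + (ks.length : Int) = j + (ks.length : Int) * 1 by ring, Int.add_mul_emod_self_left]
  rw [this]

theorem run_shift_d (ks : List Char) (hks : ks ≠ []) :
    ∀ (n : Nat) (j : Int) (s : Int × Int), run ks n (j + (ks.length : Int)) s = run ks n j s := by
  intro n
  induction n with
  | zero => intro j s; rfl
  | succ n ih =>
      intro j s
      show run ks n (j + (ks.length : Int) + 1) _ = run ks n (j + 1) _
      rw [kAt_add_d ks hks j]
      have : j + (ks.length : Int) + 1 = (j + 1) + (ks.length : Int) := by ring
      rw [this, ih]

theorem run_shift_kd (ks : List Char) (hks : ks ≠ []) (k : Nat) :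
    ∀ (n : Nat) (j : Int) (s : Int × Int), run ks n (j + ((k * ks.length : Nat) : Int)) s = run ks n j s := by
  induction k with
  | zero => intro n j s; simp
  | succ k ih =>
      intro n j s
      have : (((k + 1) * ks.length : Nat) : Int) = ((k * ks.length : Nat) : Int) + (ks.length : Int) := by
        push_cast; ring
      rw [this, ← add_assoc, run_shift_d ks hks, ih]

theorem run_three (ks : List Char) (j L R : Int) :
    run ks 3 j (L, R) =
      (PySem.Int.bxor L (PySem.Int.bxor (kAt ks (j + 1)) (kAt ks (j + 1 + 1))),
       PySem.Int.bxor R (PySem.Int.bxor (kAt ks j) (kAt ks (j + 1)))) := by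
  simp only [run]
  rw [Prod.mk.injEq]
  constructor <;>
    simp [bxor_assoc, PySem.Int.bxor_comm, bxor_left_comm, PySem.Int.bxor_self,
      PySem.Int.bxor_zero, bxor_zero_left, bxor_cancel]

theorem run_three_mul (ks : List Char) (m : Nat) :
    ∀ (j : Int), ∃ x y : Int, ∀ L R : Int,
      run ks (3 * m) j (L, R) = (PySem.Int.bxor L x, PySem.Int.bxor R y) := by
  induction m with
  | zero =>
      intro j
      exact ⟨0, 0, fun L R => by simp [run, PySem.Int.bxor_zero]⟩
  | succ m ih =>
      intro j
      obtain ⟨x, y, hxy⟩ := ih (j + 3)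
      refine ⟨PySem.Int.bxor (PySem.Int.bxor (kAt ks (j + 1)) (kAt ks (j + 1 + 1))) x,
              PySem.Int.bxor (PySem.Int.bxor (kAt ks j) (kAt ks (j + 1))) y, fun L R => ?_⟩
      have h1 : 3 * (m + 1) = 3 + 3 * m := by ring
      rw [h1, run_append ks 3 (3 * m) j (L, R), run_three]
      show run ks (3 * m) (j + 3) _ = _
      rw [hxy]
      simp [bxor_assoc]

theorem run_period (ks : List Char) (hks : ks ≠ []) (j : Int) (s : Int × Int) :
    run ks (6 * ks.length) j s = s := by
  obtain ⟨L, R⟩ := s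
  obtain ⟨x, y, hxy⟩ := run_three_mul ks ks.length j
  have h1 : 6 * ks.length = 3 * ks.length + 3 * ks.length := by ring
  rw [h1, run_append, hxy]
  rw [run_shift_kd ks hks 3 (3 * ks.length) j, hxy, Prod.mk.injEq]
  exact ⟨by rw [bxor_assoc, PySem.Int.bxor_self, PySem.Int.bxor_zero],
         by rw [bxor_assoc, PySem.Int.bxor_self, PySem.Int.bxor_zero]⟩

theorem run_mod (ks : List Char) (hks : ks ≠ []) :
    ∀ (n : Nat) (j : Int) (s : Int × Int), run ks n j s = run ks (n % (6 * ks.length)) j s := by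
  have hd : 0 < ks.length := List.length_pos_iff.mpr hks
  intro n
  induction n using Nat.strong_induction_on with
  | _ n ih =>
      intro j s
      by_cases h : n < 6 * ks.length
      · rw [Nat.mod_eq_of_lt h]
      · push_neg at h
        have h1 : n = 6 * ks.length + (n - 6 * ks.length) := by omega
        have e : run ks n j s = run ks (n - 6 * ks.length) j s := by
          conv_lhs => rw [h1]
          rw [run_append, run_period ks hks, run_shift_kd ks hks 6]
        rw [e, ih (n - 6 * ks.length) (by omega) j s, Nat.mod_eq_sub_mod h]

-- --- A's fold computes run ---
theorem stepA_eq (ks : List Char) (hks : ks ≠ []) (L R j : Int) :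
    fstStepA ks (ks.length : Int) (L, R, j) =
      (PySem.Int.bxor R (PySem.Int.bxor L (kAt ks j)), L, j + 1) := by
  have hd : (0 : Int) < (ks.length : Int) := by
    have := List.length_pos_iff.mpr hks; exact_mod_cast this
  have h0 : (0 : Int) ≤ PySem.Int.mod j (ks.length : Int) := PySem.Int.mod_nonneg j hd
  unfold fstStepA pyOrd kAt
  dsimp only
  rw [PySem.List.slice_from ks h0, List.headD_eq_head?_getD, List.head?_drop,
    List.getD_eq_getElem?_getD]

theorem foldA_eq (ks : List Char) (hks : ks ≠ []) :
    ∀ (l : List Int) (L R j : Int),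
      l.foldl (fun st _i => fstStepA ks (ks.length : Int) st) (L, R, j) =
        ((run ks l.length j (L, R)).1, (run ks l.length j (L, R)).2, j + (l.length : Int)) := by
  intro l
  induction l with
  | nil => intro L R j; simp [run]
  | cons a l ih =>
      intro L R j
      rw [List.foldl_cons, stepA_eq ks hks]
      rw [ih]
      show _ = ((run ks (l.length + 1) j (L, R)).1, (run ks (l.length + 1) j (L, R)).2, _)
      have : run ks (l.length + 1) j (L, R) =
          run ks l.length (j + 1) (PySem.Int.bxor R (PySem.Int.bxor L (kAt ks j)), L) := rfl
      rw [this, Prod.mk.injEq, Prod.mk.injEq]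
      refine ⟨rfl, rfl, ?_⟩
      simp only [List.length_cons]
      push_cast
      ring

-- --- B's masks: msk ks a c n j = XOR of the key bytes kAt (a+j') for j ≤ j' < j+n with j' % 3 ≠ c ---
def msk (ks : List Char) (a : Int) (c : Int) : Nat → Int → Int
  | 0, _ => 0
  | n + 1, j => PySem.Int.bxor (if PySem.Int.mod j 3 ≠ c then kAt ks (a + j) else 0)
                  (msk ks a c n (j + 1))

theorem msk_shift (ks : List Char) (c : Int) (hc : 0 ≤ c ∧ c < 3) :
    ∀ (n : Nat) (a j : Int), msk ks a c n (j + 1) = msk ks (a + 1) ((c + 2) % 3) n j := by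
  intro n
  induction n with
  | zero => intro a j; rfl
  | succ n ih =>
      intro a j
      simp only [msk]
      have h3 : (0 : Int) < 3 := by norm_num
      have hcond : (PySem.Int.mod (j + 1) 3 ≠ c) ↔ (PySem.Int.mod j 3 ≠ (c + 2) % 3) := by
        rw [PySem.Int.mod_eq_emod_of_pos h3, PySem.Int.mod_eq_emod_of_pos h3]
        omega
      have harg : a + (j + 1) = (a + 1) + j := by ring
      rw [ih]
      by_cases h : PySem.Int.mod j 3 ≠ (c + 2) % 3
      · rw [if_pos (hcond.mpr h), if_pos h, harg]
      · rw [if_neg (fun hh => h (hcond.mp hh)), if_neg h]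

-- --- B's fold computes the two masks ---
theorem stepB_eq (ks : List Char) (hks : ks ≠ []) (keyi m xL xR j : Int) :
    fstStepB ks (ks.length : Int) keyi m (xL, xR) j =
      (if PySem.Int.mod j 3 ≠ m then PySem.Int.bxor xL (kAt ks (keyi + j)) else xL,
       if PySem.Int.mod j 3 ≠ PySem.Int.mod (m + 2) 3 then PySem.Int.bxor xR (kAt ks (keyi + j)) else xR) := by
  have hd : (0 : Int) < (ks.length : Int) := by
    have := List.length_pos_iff.mpr hks; exact_mod_cast this
  have h0 : (0 : Int) ≤ PySem.Int.mod (keyi + j) (ks.length : Int) := PySem.Int.mod_nonneg _ hd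
  have hcast : PySem.Int.mod (keyi + j) (ks.length : Int) =
      (((PySem.Int.mod (keyi + j) (ks.length : Int)).toNat : Nat) : Int) := by omega
  unfold fstStepB pyOrd kAt
  dsimp only
  rw [hcast, PySem.List.pyGetD_natCast, Int.toNat_natCast]

theorem foldB_eq (ks : List Char) (hks : ks ≠ []) (keyi m : Int) :
    ∀ (n : Nat) (j xL xR : Int),
      (PySem.List.pyRange j (j + (n : Int)) 1).foldl (fstStepB ks (ks.length : Int) keyi m) (xL, xR) =
        (PySem.Int.bxor xL (msk ks keyi m n j),
         PySem.Int.bxor xR (msk ks keyi (PySem.Int.mod (m + 2) 3) n j)) := by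
  intro n
  induction n with
  | zero =>
      intro j xL xR
      rw [show j + ((0 : Nat) : Int) = j by simp, PySem.List.pyRange_one_eq_nil (le_refl j)]
      simp [msk, PySem.Int.bxor_zero]
  | succ n ih =>
      intro j xL xR
      have hlt : j < j + ((n + 1 : Nat) : Int) := by push_cast; omega
      rw [PySem.List.pyRange_one_cons hlt, List.foldl_cons, stepB_eq ks hks]
      have harr : j + ((n + 1 : Nat) : Int) = (j + 1) + ((n : Nat) : Int) := by push_cast; ring
      rw [harr, ih (j + 1)]
      simp only [msk]
      rw [Prod.mk.injEq]
      constructor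
      · by_cases h : PySem.Int.mod j 3 ≠ m
        · rw [if_pos h, if_pos h, bxor_assoc]
        · rw [if_neg h, if_neg h, bxor_zero_left]
      · by_cases h : PySem.Int.mod j 3 ≠ PySem.Int.mod (m + 2) 3
        · rw [if_pos h, if_pos h, bxor_assoc]
        · rw [if_neg h, if_neg h, bxor_zero_left]

-- --- closed form for run: affine in (L,R) with the two masks ---
theorem run_closed (ks : List Char) :
    ∀ (n : Nat) (a L R : Int),
      run ks n a (L, R) =
        (PySem.Int.bxor (if n % 3 = 0 then L else if n % 3 = 1 then PySem.Int.bxor L R else R)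
           (msk ks a ((n % 3 : Nat) : Int) n 0),
         PySem.Int.bxor (if n % 3 = 0 then R else if n % 3 = 1 then L else PySem.Int.bxor L R)
           (msk ks a (((n + 2) % 3 : Nat) : Int) n 0)) := by
  intro n
  induction n with
  | zero => intro a L R; simp [run, msk, PySem.Int.bxor_zero]
  | succ n ih =>
      intro a L R
      have hstep : run ks (n + 1) a (L, R) =
          run ks n (a + 1) (PySem.Int.bxor R (PySem.Int.bxor L (kAt ks a)), L) := rfl
      rw [hstep, ih (a + 1)]
      -- expand the (n+1)-masks one step and shift
      have hm1 : ∀ c : Int, 0 ≤ c → c < 3 →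
          msk ks a c (n + 1) 0 =
            PySem.Int.bxor (if (0 : Int) ≠ c then kAt ks a else 0) (msk ks (a + 1) ((c + 2) % 3) n 0) := by
        intro c hc0 hc3
        simp only [msk]
        rw [show (0 : Int) + 1 = 1 by ring, show (1 : Int) = 0 + 1 by ring, msk_shift ks c ⟨hc0, hc3⟩]
        norm_num [PySem.Int.mod]
      rcases (show n % 3 = 0 ∨ n % 3 = 1 ∨ n % 3 = 2 by omega) with hk | hk | hk <;>
        [ (have hk1 : (n + 1) % 3 = 1 := by omega;
           have hk2 : (n + 1 + 2) % 3 = 0 := by omega;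
           have hk3 : (n + 2) % 3 = 2 := by omega);
          (have hk1 : (n + 1) % 3 = 2 := by omega;
           have hk2 : (n + 1 + 2) % 3 = 1 := by omega;
           have hk3 : (n + 2) % 3 = 0 := by omega);
          (have hk1 : (n + 1) % 3 = 0 := by omega;
           have hk2 : (n + 1 + 2) % 3 = 2 := by omega;
           have hk3 : (n + 2) % 3 = 1 := by omega)] <;>
      · rw [hk, hk1, hk2, hk3, hm1 _ (by omega) (by omega), hm1 _ (by omega) (by omega)]
        norm_num
        constructor <;>
          simp [bxor_assoc, PySem.Int.bxor_comm, bxor_left_comm, PySem.Int.bxor_self,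
            PySem.Int.bxor_zero, bxor_zero_left, bxor_cancel]

-- ===== VERDICT (by name: the statement is the Claim_ definition above) =====
theorem fst_spec : Claim_equal_fst := by
  intro L R keyi N key _hDom hPre
  unfold Spec_fst fst fst_alt
  by_cases hN : N ≤ 0
  · rw [PySem.List.pyRange_one_eq_nil hN]
    simp [hN]
  · push_neg at hN
    have hkey : key ≠ "" := hPre.1 hN
    have hks : key.toList ≠ [] := fun h => hkey (String.toList_eq_nil_iff.mp h)
    have hd : 0 < key.toList.length := List.length_pos_iff.mpr hks
    have hdI : (0 : Int) < 6 * (key.toList.length : Int) := by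
      have : (0 : Int) < (key.toList.length : Int) := by exact_mod_cast hd
      omega
    simp only [not_le.mpr hN, if_false]
    -- A side: its fold is run over N.toNat rounds, reduced mod the period
    have hlen : (PySem.List.pyRange 0 N 1).length = N.toNat := by
      rw [PySem.List.length_pyRange_one]; omega
    have hA := foldA_eq key.toList hks (PySem.List.pyRange 0 N 1) L R keyi
    rw [hlen] at hA
    rw [hA]
    set rn : Nat := N.toNat % (6 * key.toList.length) with hrn
    rw [run_mod key.toList hks N.toNat keyi (L, R), ← hrn]
    -- B side: its r equals rn
    have hr : PySem.Int.mod N (6 * (key.toList.length : Int)) = ((rn : Nat) : Int) := by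
      rw [PySem.Int.mod_eq_emod_of_pos hdI, hrn,
        show (6 * ((key.toList.length : Nat) : Int)) = ((6 * key.toList.length : Nat) : Int) by
          push_cast; ring]
      conv_lhs => rw [show N = ((N.toNat : Nat) : Int) by omega]
      rw [← Int.natCast_mod]
    rw [hr]
    have hm : PySem.Int.mod ((rn : Nat) : Int) 3 = ((rn % 3 : Nat) : Int) := by
      rw [PySem.Int.mod_eq_emod_of_pos (by norm_num : (0:Int) < 3)]
      omega
    rw [hm]
    have hm2 : PySem.Int.mod (((rn % 3 : Nat) : Int) + 2) 3 = (((rn + 2) % 3 : Nat) : Int) := by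
      rw [PySem.Int.mod_eq_emod_of_pos (by norm_num : (0:Int) < 3)]
      push_cast; omega
    have hB := foldB_eq key.toList hks keyi ((rn % 3 : Nat) : Int) rn 0 0 0
    rw [show (0 : Int) + ((rn : Nat) : Int) = ((rn : Nat) : Int) by ring, hm2] at hB
    rw [hB, run_closed key.toList rn keyi L R]
    rw [bxor_zero_left, bxor_zero_left]
    rcases (show rn % 3 = 0 ∨ rn % 3 = 1 ∨ rn % 3 = 2 by omega) with hk | hk | hk <;>
      rw [hk] <;> norm_num <;> omega
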